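-- pv_equiv track=rewrite | github.com/failmap/failmap | failmap/scanners/scanner_tls_osaft.py | final_grade
-- ===== SOURCE A (Python) =====
-- def final_grade(ratings):
--     # Order from worst to best: F, C, B, A, A+
--     grades = []
--     for rating in ratings:
--         grades.append(rating['grade'])
--
--     if "F" in grades:
--         return "F"
--
--     if "C" in grades:
--         return "C"
--
--     if "B" in grades:
--         return "B"
--
--     if "A" in grades:
--         return "A"
--
--     if "A+" in grades:
--         return "A+"
--
--     return "?"
-- ===== SOURCE B (Python) =====
-- def final_grade(ratings):
--     RANK = {"F": 0, "C": 1, "B": 2, "A": 3, "A+": 4}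
--     ORDER = ["F", "C", "B", "A", "A+"]
--     best = None
--     for rating in ratings:
--         r = RANK.get(rating['grade'])
--         if r is not None and (best is None or r < best):
--             best = r
--     return ORDER[best] if best is not None else "?"
-- ===== Notes on version B (the rewrite author's own statement) =====
-- stated objective: simpler
-- what changed: Replaces the list-building loop plus five sequential membership scans with a single pass that tracks the minimum rank of each grade under a precomputed rank map, then reads the answer off an ordered list.
import Mathlib
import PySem

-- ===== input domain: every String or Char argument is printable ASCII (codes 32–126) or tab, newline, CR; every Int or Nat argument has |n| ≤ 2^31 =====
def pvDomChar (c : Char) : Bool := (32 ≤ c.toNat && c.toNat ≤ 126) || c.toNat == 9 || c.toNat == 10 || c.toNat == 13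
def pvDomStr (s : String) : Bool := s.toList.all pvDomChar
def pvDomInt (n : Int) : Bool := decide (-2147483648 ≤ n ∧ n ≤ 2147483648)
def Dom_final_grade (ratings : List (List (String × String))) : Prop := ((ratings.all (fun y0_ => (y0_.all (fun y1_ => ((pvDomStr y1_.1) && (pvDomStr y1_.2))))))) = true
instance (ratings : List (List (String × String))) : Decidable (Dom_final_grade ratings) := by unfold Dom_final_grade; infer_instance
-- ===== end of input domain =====

-- B replaces A's list-building loop plus five sequential membership scans by one
-- min-rank pass over a rank map (objective: simpler); same return value on Pre_.

-- ===== PORT A =====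
def final_grade (ratings : List (List (String × String))) : String :=
  -- grades = []; for rating in ratings: grades.append(rating['grade'])
  -- rating['grade'] is ported as first-match lookup; Pre_ excludes the KeyError case,
  -- so the .getD "" default is never reached on admitted inputs.
  let grades := ratings.foldl (fun acc rating => acc ++ [((PySem.Dict.mk rating).get? "grade").getD ""]) []
  if "F" ∈ grades then "F"
  else if "C" ∈ grades then "C"
  else if "B" ∈ grades then "B"
  else if "A" ∈ grades then "A"
  else if "A+" ∈ grades then "A+"
  else "?"

-- ===== PORT B =====
def final_grade_alt (ratings : List (List (String × String))) : String :=
  -- best = None; for rating in ratings: r = RANK.get(rating['grade']); update best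
  let best := ratings.foldl (fun best rating =>
      match (PySem.Dict.mk [("F", (0 : Nat)), ("C", 1), ("B", 2), ("A", 3), ("A+", 4)]).get?
              (((PySem.Dict.mk rating).get? "grade").getD "") with
      | none => best
      | some r =>
        match best with
        | none => some r
        | some b => if r < b then some r else some b) none
  match best with
  | none => "?"
  | some b => ["F", "C", "B", "A", "A+"].getD b "?"

-- ===== PRECONDITION & SPEC =====
-- Pre_ excludes exactly the inputs where some rating lacks a 'grade' key, on which
-- the Python A (and B alike) raises KeyError.
def Pre_final_grade (ratings : List (List (String × String))) : Prop :=
  ∀ r ∈ ratings, "grade" ∈ r.map Prod.fst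
instance (ratings : List (List (String × String))) : Decidable (Pre_final_grade ratings) := by unfold Pre_final_grade; infer_instance
def pvWitness_final_grade : (List (List (String × String))) := [[("grade", "A")], [("grade", "F")]]

def Spec_final_grade (ratings : List (List (String × String))) (out : String) : Prop := out = final_grade_alt ratings
instance (ratings : List (List (String × String))) (out : String) : Decidable (Spec_final_grade ratings out) := by unfold Spec_final_grade; infer_instance

-- ===== CLAIM (what is proved, stated in full; the proofs are below) =====
def Claim_equal_final_grade : Prop := ∀ (ratings : List (List (String × String))), Dom_final_grade ratings → Pre_final_grade ratings → Spec_final_grade ratings (final_grade ratings)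

-- ===== LEMMAS AND PROOFS =====

-- the grade string extracted from one rating (shared shape of both ports' lookups)
def pvGrade (r : List (String × String)) : String :=
  ((PySem.Dict.mk r).get? "grade").getD ""

-- B's rank map lookup
def pvRank (g : String) : Option Nat :=
  (PySem.Dict.mk [("F", (0 : Nat)), ("C", 1), ("B", 2), ("A", 3), ("A+", 4)]).get? g

-- min on Option Nat with none as identity
def pvOmin : Option Nat → Option Nat → Option Nat
  | none, b => b
  | some a, none => some a
  | some a, some b => some (min a b)

-- minimum rank occurring in a list of grade strings
def pvMr : List String → Option Nat
  | [] => none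
  | g :: gs => pvOmin (pvRank g) (pvMr gs)

theorem pvRank_eq (g : String) :
    pvRank g = if g = "F" then some 0 else if g = "C" then some 1 else if g = "B" then some 2
      else if g = "A" then some 3 else if g = "A+" then some 4 else none := by
  simp only [pvRank, PySem.Dict.get?_mk_cons, beq_iff_eq]
  split_ifs <;> first | rfl | simp_all

theorem pvRank_inv {g : String} {k : Nat} (h : pvRank g = some k) :
    (k = 0 ∧ g = "F") ∨ (k = 1 ∧ g = "C") ∨ (k = 2 ∧ g = "B") ∨ (k = 3 ∧ g = "A") ∨ (k = 4 ∧ g = "A+") := by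
  rw [pvRank_eq] at h
  split_ifs at h <;> simp_all

theorem pvOmin_assoc (a b c : Option Nat) : pvOmin (pvOmin a b) c = pvOmin a (pvOmin b c) := by
  cases a <;> cases b <;> cases c <;> simp [pvOmin, Nat.min_assoc]

theorem pvOmin_none_right (a : Option Nat) : pvOmin a none = a := by
  cases a <;> rfl

-- B's loop step is pvOmin with the rank of the extracted grade
theorem pvStep_eq (best : Option Nat) (g : String) :
    (match pvRank g with
     | none => best
     | some r =>
       match best with
       | none => some r
       | some b => if r < b then some r else some b) = pvOmin best (pvRank g) := by
  cases h : pvRank g <;> cases best <;> simp [pvOmin, Nat.min_def] <;> (split_ifs <;> first | rfl | omega)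

theorem pvFoldB (gs : List String) (acc : Option Nat) :
    gs.foldl (fun b g => pvOmin b (pvRank g)) acc = pvOmin acc (pvMr gs) := by
  induction gs generalizing acc with
  | nil => simp [pvMr, pvOmin_none_right]
  | cons g gs ih => simp [List.foldl_cons, pvMr, ih, pvOmin_assoc]

theorem pvMr_mem {gs : List String} {k : Nat} (h : pvMr gs = some k) :
    ∃ g ∈ gs, pvRank g = some k := by
  induction gs generalizing k with
  | nil => simp [pvMr] at h
  | cons g gs ih =>
    simp only [pvMr] at h
    cases hg : pvRank g with
    | none =>
      rw [hg] at h
      simp only [pvOmin] at h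
      obtain ⟨g', hg', hk⟩ := ih h
      exact ⟨g', List.mem_cons_of_mem _ hg', hk⟩
    | some a =>
      rw [hg] at h
      cases hm : pvMr gs with
      | none =>
        rw [hm] at h
        simp only [pvOmin, Option.some.injEq] at h
        exact ⟨g, by simp, by rw [hg, h]⟩
      | some b =>
        rw [hm] at h
        simp only [pvOmin, Option.some.injEq] at h
        by_cases hab : a ≤ b
        · exact ⟨g, by simp, by rw [hg, ← h, Nat.min_eq_left hab]⟩
        · obtain ⟨g', hg', hk⟩ := ih (k := b) hm
          exact ⟨g', List.mem_cons_of_mem _ hg', by rw [hk, ← h, Nat.min_eq_right (Nat.le_of_not_le hab)]⟩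

theorem pvMr_lb {gs : List String} {g : String} {j : Nat} (hg : g ∈ gs) (hr : pvRank g = some j) :
    ∃ k, pvMr gs = some k ∧ k ≤ j := by
  induction gs with
  | nil => simp at hg
  | cons g' gs ih =>
    rcases List.mem_cons.mp hg with h | h
    · subst h
      simp only [pvMr, hr]
      cases hm : pvMr gs
      · exact ⟨j, rfl, le_refl j⟩
      · exact ⟨min j _, rfl, Nat.min_le_left _ _⟩
    · obtain ⟨k, hk, hkj⟩ := ih h
      simp only [pvMr, hk]
      cases hg' : pvRank g'
      · exact ⟨k, rfl, hkj⟩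
      · exact ⟨min _ k, rfl, le_trans (Nat.min_le_right _ _) hkj⟩

theorem pvNotMem {gs : List String} {k j : Nat} {s : String}
    (hm : pvMr gs = some k) (hr : pvRank s = some j) (hj : j < k) : s ∉ gs := by
  intro h
  obtain ⟨k', hk', hle⟩ := pvMr_lb h hr
  rw [hm] at hk'
  injection hk' with hk'
  omega

-- main: A's membership chain over a grade list equals B's answer from the minimum rank
theorem pvMain (gs : List String) :
    (if "F" ∈ gs then "F" else if "C" ∈ gs then "C" else if "B" ∈ gs then "B"
     else if "A" ∈ gs then "A" else if "A+" ∈ gs then "A+" else "?")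
      = (match pvMr gs with
         | none => "?"
         | some b => ["F", "C", "B", "A", "A+"].getD b "?") := by
  cases hm : pvMr gs with
  | none =>
    have hx : ∀ s : String, ∀ j : Nat, pvRank s = some j → s ∉ gs := by
      intro s j hr h
      obtain ⟨k, hk, _⟩ := pvMr_lb h hr
      rw [hm] at hk
      simp at hk
    have hF := hx "F" 0 (by decide)
    have hC := hx "C" 1 (by decide)
    have hB := hx "B" 2 (by decide)
    have hA := hx "A" 3 (by decide)
    have hAp := hx "A+" 4 (by decide)
    simp [hF, hC, hB, hA, hAp]
  | some k =>
    obtain ⟨g, hg, hr⟩ := pvMr_mem hm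
    rcases pvRank_inv hr with ⟨hk, hgv⟩ | ⟨hk, hgv⟩ | ⟨hk, hgv⟩ | ⟨hk, hgv⟩ | ⟨hk, hgv⟩ <;>
      subst hk <;> subst hgv
    · simp [hg]
    · have hF := pvNotMem hm (show pvRank "F" = some 0 by decide) (by omega)
      simp [hF, hg]
    · have hF := pvNotMem hm (show pvRank "F" = some 0 by decide) (by omega)
      have hC := pvNotMem hm (show pvRank "C" = some 1 by decide) (by omega)
      simp [hF, hC, hg]
    · have hF := pvNotMem hm (show pvRank "F" = some 0 by decide) (by omega)
      have hC := pvNotMem hm (show pvRank "C" = some 1 by decide) (by omega)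
      have hB := pvNotMem hm (show pvRank "B" = some 2 by decide) (by omega)
      simp [hF, hC, hB, hg]
    · have hF := pvNotMem hm (show pvRank "F" = some 0 by decide) (by omega)
      have hC := pvNotMem hm (show pvRank "C" = some 1 by decide) (by omega)
      have hB := pvNotMem hm (show pvRank "B" = some 2 by decide) (by omega)
      have hA := pvNotMem hm (show pvRank "A" = some 3 by decide) (by omega)
      simp [hF, hC, hB, hA, hg]

-- ===== VERDICT (by name: the statement is the Claim_ definition above) =====
theorem final_grade_spec : Claim_equal_final_grade := by
  intro ratings _ _
  show final_grade ratings = final_grade_alt ratings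
  unfold final_grade final_grade_alt
  have hA : ratings.foldl (fun acc rating => acc ++ [((PySem.Dict.mk rating).get? "grade").getD ""]) []
      = ratings.map pvGrade := by
    simpa [pvGrade] using
      PySem.List.foldl_append_singleton_eq_map (l := ratings) (f := pvGrade) (acc := [])
  have hB : ratings.foldl (fun best rating =>
      match (PySem.Dict.mk [("F", (0 : Nat)), ("C", 1), ("B", 2), ("A", 3), ("A+", 4)]).get?
              (((PySem.Dict.mk rating).get? "grade").getD "") with
      | none => best
      | some r =>
        match best with
        | none => some r
        | some b => if r < b then some r else some b) none
      = pvMr (ratings.map pvGrade) := by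
    have h1 : ratings.foldl (fun best rating =>
        match (PySem.Dict.mk [("F", (0 : Nat)), ("C", 1), ("B", 2), ("A", 3), ("A+", 4)]).get?
                (((PySem.Dict.mk rating).get? "grade").getD "") with
        | none => best
        | some r =>
          match best with
          | none => some r
          | some b => if r < b then some r else some b) none
        = ratings.foldl (fun b r => pvOmin b (pvRank (pvGrade r))) none :=
      PySem.List.foldl_congr_mem ratings _ _ none (fun b r _ => pvStep_eq b (pvGrade r))
    rw [h1, show ratings.foldl (fun b r => pvOmin b (pvRank (pvGrade r))) none = (ratings.map pvGrade).foldl (fun b g => pvOmin b (pvRank g)) none from (List.foldl_map (f := pvGrade) (g := fun b g => pvOmin b (pvRank g))).symm, pvFoldB]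
    rfl
  rw [hA, hB]
  exact pvMain (ratings.map pvGrade)
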